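-- pv_equiv track=rewrite | github.com/Shalini-priya6299/Linkedln-Network-Graph-Analysis | notebooks/exported_notebook.py | prune_walk
-- ===== SOURCE A (Python) =====
-- def prune_walk(walk, start, end):
--     if not walk:
--         return []
--     path = [start]
--     for node in walk[1:]:
--         path.append(node)
--         if node == end:
--             break
--     return path
-- ===== SOURCE B (Python) =====
-- def prune_walk(walk, start, end):
--     if not walk:
--         return []
--     try:
--         idx = walk.index(end, 1)
--     except ValueError:
--         return [start] + list(walk[1:])
--     return [start] + list(walk[1:idx + 1])
-- ===== Notes on version B (the rewrite author's own statement) =====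
-- stated objective: simpler
-- what changed: Replaces the element-by-element accumulating loop-with-break by a single find (list.index searching from position 1) followed by one slice.
import Mathlib
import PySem

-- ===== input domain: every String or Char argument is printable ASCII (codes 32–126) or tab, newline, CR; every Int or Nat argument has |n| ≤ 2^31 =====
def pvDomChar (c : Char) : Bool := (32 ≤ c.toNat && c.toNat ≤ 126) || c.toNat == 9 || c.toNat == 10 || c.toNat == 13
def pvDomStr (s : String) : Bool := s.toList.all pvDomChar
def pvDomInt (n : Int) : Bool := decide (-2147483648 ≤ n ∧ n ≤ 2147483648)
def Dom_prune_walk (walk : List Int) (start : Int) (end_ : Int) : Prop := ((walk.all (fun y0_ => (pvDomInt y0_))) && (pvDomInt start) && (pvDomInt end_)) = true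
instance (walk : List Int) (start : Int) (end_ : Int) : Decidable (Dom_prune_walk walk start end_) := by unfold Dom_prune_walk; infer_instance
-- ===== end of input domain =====

-- B replaces A's accumulate-until-break loop by one index?-search from position 1 plus one slice (objective: simpler).

-- ===== PORT A =====
-- A's for-loop with break: structural recursion carrying the accumulated path.
def pruneLoop (end_ : Int) : List Int → List Int → List Int
  | [], path => path
  | n :: rest, path =>
      let path' := path ++ [n]
      if n = end_ then path' else pruneLoop end_ rest path'

def prune_walk (walk : List Int) (start : Int) (end_ : Int) : List Int :=
  if walk = [] then [] else pruneLoop end_ (PySem.List.slice walk (some 1) none) [start]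

-- ===== PORT B =====
def prune_walk_alt (walk : List Int) (start : Int) (end_ : Int) : List Int :=
  if walk = [] then []
  else
    -- walk.index(end, 1): first occurrence searching from position 1 = index? on walk[1:] shifted by 1
    match PySem.List.index? (PySem.List.slice walk (some 1) none) end_ with
    | none => start :: PySem.List.slice walk (some 1) none                               -- ValueError branch
    | some j => start :: PySem.List.slice walk (some 1) (some ((j : Int) + 2))          -- walk[1:idx+1], idx = j+1

-- ===== PRECONDITION & SPEC =====
def Spec_prune_walk (walk : List Int) (start : Int) (end_ : Int) (out : List Int) : Prop := out = prune_walk_alt walk start end_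
instance (walk : List Int) (start : Int) (end_ : Int) (out : List Int) : Decidable (Spec_prune_walk walk start end_ out) := by unfold Spec_prune_walk; infer_instance

-- ===== CLAIM (what is proved, stated in full; the proofs are below) =====
def Claim_equal_prune_walk : Prop := ∀ (walk : List Int) (start : Int) (end_ : Int), Dom_prune_walk walk start end_ → Spec_prune_walk walk start end_ (prune_walk walk start end_)

-- ===== LEMMAS AND PROOFS =====
theorem pruneLoop_char (end_ : Int) (l acc : List Int) :
    pruneLoop end_ l acc =
      acc ++ (match PySem.List.index? l end_ with
              | none => l
              | some j => l.take (j + 1)) := by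
  induction l generalizing acc with
  | nil => simp [pruneLoop, PySem.List.index?]
  | cons n rest ih =>
    by_cases h : n = end_
    · subst h
      rw [PySem.List.index?_cons_self]
      simp [pruneLoop]
    · rw [PySem.List.index?_cons_of_ne rest h]
      simp only [pruneLoop, if_neg h, ih]
      cases hi : PySem.List.index? rest end_ with
      | none => simp
      | some j => simp [List.take_succ_cons]

theorem prune_walk_spec : Claim_equal_prune_walk := by
  intro walk start end_ _
  unfold Spec_prune_walk prune_walk prune_walk_alt
  by_cases hw : walk = []
  · simp [hw]
  · simp only [if_neg hw]
    rw [pruneLoop_char]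
    cases hi : PySem.List.index? (PySem.List.slice walk (some 1) none) end_ with
    | none => simp
    | some j =>
      have : PySem.List.slice walk (some 1) (some ((j : Int) + 2)) =
          (PySem.List.slice walk (some 1) none).take (j + 1) := by
        have h2 : ((j : Int) + 2) = ((j + 2 : Nat) : Int) := by push_cast; ring
        rw [h2, show ((1 : Int)) = ((1 : Nat) : Int) from rfl,
          PySem.List.slice_natCast, PySem.List.slice_from_natCast]
        simp
      simp [this]
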